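-- pv_equiv track=rewrite | github.com/gabriel-klein-rev/2009-Big-Data-Revature | Python/CodingAssesmentShortAnswers/IMocha1July5.py | min_removals_to_make_frequencies_divisible
-- ===== SOURCE A (Python) =====
-- def min_removals_to_make_frequencies_divisible(A, K):
--     from collections import Counter
--
--     # Step 1: Count the frequency of each element in the array
--     freq = Counter(A)
--
--     # Step 2: Initialize the count of elements to remove
--     removals = 0
--
--     # Step 3: Iterate through the frequency dictionary
--     for count in freq.values():
--         # If the frequency is not divisible by K
--         if count % K != 0:
--             # Calculate the number of removals needed
--             removals += count % K
--
--     return removals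
-- ===== SOURCE B (Python) =====
-- def min_removals_to_make_frequencies_divisible(A, K):
--     total = 0
--     run = 0
--     prev = None
--     for x in sorted(A):
--         if run > 0 and x == prev:
--             run += 1
--         else:
--             if run > 0:
--                 total += run % K
--             prev = x
--             run = 1
--     if run > 0:
--         total += run % K
--     return total
-- ===== Notes on version B (the rewrite author's own statement) =====
-- stated objective: alternative
-- what changed: B drops the Counter/hash dict entirely: it sorts A and scans once, grouping consecutive equal elements by tracking the current value and run length, adding run % K at each group boundary.
import Mathlib
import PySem

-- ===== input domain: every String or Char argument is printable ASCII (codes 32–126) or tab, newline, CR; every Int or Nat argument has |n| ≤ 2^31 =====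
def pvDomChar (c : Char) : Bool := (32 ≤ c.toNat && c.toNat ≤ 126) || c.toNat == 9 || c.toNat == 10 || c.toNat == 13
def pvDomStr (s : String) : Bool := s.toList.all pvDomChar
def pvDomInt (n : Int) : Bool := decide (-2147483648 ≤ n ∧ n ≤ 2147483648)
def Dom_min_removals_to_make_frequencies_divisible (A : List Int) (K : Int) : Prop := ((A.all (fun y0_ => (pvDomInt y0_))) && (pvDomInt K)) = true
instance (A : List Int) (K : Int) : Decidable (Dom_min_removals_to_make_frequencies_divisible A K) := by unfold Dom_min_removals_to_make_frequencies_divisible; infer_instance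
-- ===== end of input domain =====

-- B replaces A's Counter/hash dict with a sort-then-scan over consecutive runs (objective: alternative).

-- ===== PORT A =====
def min_removals_to_make_frequencies_divisible (A : List Int) (K : Int) : Int :=
  -- freq = Counter(A); for count in freq.values(): if count % K != 0: removals += count % K
  (PySem.Dict.counter A).values.foldl
    (fun removals count =>
      if PySem.Int.mod count K ≠ 0 then removals + PySem.Int.mod count K else removals) 0

-- ===== PORT B =====
-- the for-loop of Source B over sorted(A), with its state (prev, run, total); the trailing
-- 'if run > 0: total += run % K' is the [] case
def pvScanB (K : Int) : List Int → Option Int → Int → Int → Int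
  | [], _, run, total => if run > 0 then total + PySem.Int.mod run K else total
  | x :: xs, prev, run, total =>
      if run > 0 ∧ prev = some x then
        pvScanB K xs prev (run + 1) total
      else
        pvScanB K xs (some x) 1 (if run > 0 then total + PySem.Int.mod run K else total)

def min_removals_to_make_frequencies_divisible_alt (A : List Int) (K : Int) : Int :=
  pvScanB K (PySem.List.sorted A (fun x => x) false) none 0 0

-- ===== PRECONDITION & SPEC =====
-- Pre_ excludes only the inputs where Python raises ZeroDivisionError: K = 0 with A nonempty
-- (both A and B raise there; with A = [] no modulo is ever taken and both return 0).
def Pre_min_removals_to_make_frequencies_divisible (A : List Int) (K : Int) : Prop := A = [] ∨ K ≠ 0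
instance (A : List Int) (K : Int) : Decidable (Pre_min_removals_to_make_frequencies_divisible A K) := by unfold Pre_min_removals_to_make_frequencies_divisible; infer_instance
def pvWitness_min_removals_to_make_frequencies_divisible : List Int × Int := ([1, 1, 2, 3, 3, 3], 2)

def Spec_min_removals_to_make_frequencies_divisible (A : List Int) (K : Int) (out : Int) : Prop := out = min_removals_to_make_frequencies_divisible_alt A K
instance (A : List Int) (K : Int) (out : Int) : Decidable (Spec_min_removals_to_make_frequencies_divisible A K out) := by unfold Spec_min_removals_to_make_frequencies_divisible; infer_instance

-- ===== CLAIM (what is proved, stated in full; the proofs are below) =====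
def Claim_equal_min_removals_to_make_frequencies_divisible : Prop := ∀ (A : List Int) (K : Int), Dom_min_removals_to_make_frequencies_divisible A K → Pre_min_removals_to_make_frequencies_divisible A K → Spec_min_removals_to_make_frequencies_divisible A K (min_removals_to_make_frequencies_divisible A K)

-- ===== LEMMAS AND PROOFS =====

-- group-sum: Σ over the distinct values of xs of (their multiplicity mod K), by peeling the first value
def pvGsum (K : Int) : List Int → Int
  | [] => 0
  | x :: xs => PySem.Int.mod (1 + (xs.count x : Int)) K + pvGsum K (xs.filter (· ≠ x))
termination_by xs => xs.length
decreasing_by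
  simpa using le_trans (List.length_filter_le _ _) (by simp)

-- Skipping the 'if count % K != 0' branch adds 0, so the guarded fold is the plain sum of the mods.
theorem pv_foldl_if_mod (K : Int) (xs : List Int) (a : Int) :
    xs.foldl (fun r c => if PySem.Int.mod c K ≠ 0 then r + PySem.Int.mod c K else r) a
      = a + (xs.map (fun c => PySem.Int.mod c K)).sum := by
  induction xs generalizing a with
  | nil => simp
  | cons x t ih =>
      simp only [List.foldl_cons, List.map_cons, List.sum_cons, ih]
      split_ifs with h
      · ring
      · rw [of_not_not h]; ring

-- invariant of B's scan on an ascending list: prev = p with run r pending, p ≤ everything left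
theorem pvScanB_sorted (K : Int) (xs : List Int) (h : xs.Pairwise (· ≤ ·))
    (p r t : Int) (hall : ∀ y ∈ xs, p ≤ y) (hr : 0 < r) :
    pvScanB K xs (some p) r t
      = t + PySem.Int.mod (r + (xs.count p : Int)) K + pvGsum K (xs.filter (· ≠ p)) := by
  induction xs generalizing p r t with
  | nil =>
      simp only [List.filter_nil, List.count_nil]
      rw [pvGsum]
      simp [pvScanB, hr]
  | cons x xs ih =>
      have hx_le : ∀ y ∈ xs, x ≤ y := fun y hy => (List.pairwise_cons.1 h).1 y hy
      have hxs : xs.Pairwise (· ≤ ·) := (List.pairwise_cons.1 h).2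
      by_cases hx : x = p
      · subst hx
        rw [pvScanB, if_pos ⟨hr, rfl⟩, ih hxs x (r + 1) t (fun y hy => hx_le y hy) (by omega)]
        simp only [List.count_cons_self, List.filter_cons, decide_eq_true_eq]
        rw [if_neg (by simp)]
        push_cast
        ring_nf
      · have hpx : p < x := lt_of_le_of_ne (hall x (List.mem_cons_self)) (fun e => hx e.symm)
        have hpnot : ∀ y ∈ x :: xs, y ≠ p := by
          intro y hy he
          rcases List.mem_cons.1 hy with h1 | h1
          · exact hx (h1 ▸ he)
          · exact absurd (he ▸ hx_le y h1) (not_le.2 hpx)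
        rw [pvScanB, if_neg (by rintro ⟨-, he⟩; exact hx (Option.some.inj he).symm),
          ih hxs x 1 _ hx_le (by omega)]
        have hc0 : (x :: xs).count p = 0 :=
          List.count_eq_zero.2 (fun hm => hpnot p hm rfl)
        have hfilt : (x :: xs).filter (· ≠ p) = x :: xs :=
          List.filter_eq_self.2 (fun a ha => by simpa using hpnot a ha)
        rw [if_pos hr, hfilt, hc0]
        show _ = t + PySem.Int.mod (r + ((0 : Nat) : Int)) K + pvGsum K (x :: xs)
        rw [pvGsum]
        push_cast
        ring_nf

-- B's scan on an ascending list computes the group-sum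
theorem pvScanB_eq_gsum (K : Int) (s : List Int) (h : s.Pairwise (· ≤ ·)) :
    pvScanB K s none 0 0 = pvGsum K s := by
  cases s with
  | nil => rw [pvGsum]; simp [pvScanB]
  | cons x xs =>
      have hx_le : ∀ y ∈ xs, x ≤ y := fun y hy => (List.pairwise_cons.1 h).1 y hy
      rw [pvScanB, if_neg (by rintro ⟨h0, -⟩; omega)]
      rw [if_neg (by omega)]
      rw [pvScanB_sorted K xs (List.pairwise_cons.1 h).2 x 1 0 hx_le (by omega), pvGsum]
      ring_nf

-- the dedup of x :: xs is, up to order, x followed by the dedup of xs with x removed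
theorem pv_dedup_cons_perm (x : Int) (xs : List Int) :
    (PySem.List.dedup (x :: xs)).Perm (x :: PySem.List.dedup (xs.filter (· ≠ x))) := by
  rw [List.perm_ext_iff_of_nodup (PySem.List.nodup_dedup _)
    (by
      refine List.nodup_cons.2 ⟨?_, PySem.List.nodup_dedup _⟩
      intro hm
      have := (PySem.List.mem_dedup _ _).1 hm
      simp at this)]
  intro a
  simp only [PySem.List.mem_dedup _ _, List.mem_cons, List.mem_filter, decide_eq_true_eq]
  constructor
  · rintro (rfl | ha)
    · exact Or.inl rfl
    · by_cases hax : a = x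
      · exact Or.inl hax
      · exact Or.inr ⟨ha, hax⟩
  · rintro (rfl | ⟨ha, -⟩)
    · exact Or.inl rfl
    · exact Or.inr ha

-- the group-sum is the sum of (count mod K) over the distinct values
theorem pvGsum_eq_sum_aux (K : Int) (n : Nat) : ∀ (xs : List Int), xs.length ≤ n →
    pvGsum K xs
      = ((PySem.List.dedup xs).map (fun v => PySem.Int.mod (xs.count v : Int) K)).sum := by
  induction n with
  | zero =>
      intro xs hlen
      rw [List.length_eq_zero_iff.1 (Nat.le_zero.1 hlen)]
      rw [pvGsum]
      simp [PySem.List.dedup]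
  | succ n ihn =>
      intro xs hlen
      cases xs with
      | nil =>
          rw [pvGsum]
          simp [PySem.List.dedup]
      | cons x xs =>
          rw [pvGsum, ihn (xs.filter (· ≠ x))
            (le_trans (List.length_filter_le _ _) (by simpa using Nat.le_of_succ_le_succ hlen))]
          have hperm := (pv_dedup_cons_perm x xs).map
            (fun v => PySem.Int.mod ((x :: xs).count v : Int) K)
          rw [hperm.sum_eq, List.map_cons, List.sum_cons, List.count_cons_self]
          have : ∀ v ∈ PySem.List.dedup (xs.filter (· ≠ x)),
              PySem.Int.mod ((x :: xs).count v : Int) K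
                = PySem.Int.mod (((xs.filter (· ≠ x)).count v : Int)) K := by
            intro v hv
            have hvx : v ≠ x := by
              have := (PySem.List.mem_dedup _ _).1 hv
              simp only [List.mem_filter, decide_eq_true_eq] at this
              exact this.2
            have h1 : (x :: xs).count v = xs.count v := by simp [Ne.symm hvx]
            have h2 : (xs.filter (· ≠ x)).count v = xs.count v :=
              List.count_filter (by simp [hvx])
            rw [h1, h2]
          rw [List.map_congr_left this]
          push_cast
          ring_nf

-- the group-sum is the sum of (count mod K) over the distinct values
theorem pvGsum_eq_sum (K : Int) (xs : List Int) :
    pvGsum K xs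
      = ((PySem.List.dedup xs).map (fun v => PySem.Int.mod (xs.count v : Int) K)).sum :=
  pvGsum_eq_sum_aux K xs.length xs le_rfl

theorem min_removals_spec_aux (A : List Int) (K : Int) :
    min_removals_to_make_frequencies_divisible A K
      = min_removals_to_make_frequencies_divisible_alt A K := by
  unfold min_removals_to_make_frequencies_divisible min_removals_to_make_frequencies_divisible_alt
  set s := PySem.List.sorted A (fun x => x) false with hs
  have hsp : s.Perm A := PySem.List.sorted_perm A (fun x => x) false
  have hsorted : s.Pairwise (· ≤ ·) := PySem.List.sorted_pairwise A (fun x => x)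
  rw [pvScanB_eq_gsum K s hsorted, pvGsum_eq_sum]
  -- A's side: values of Counter(A) are the counts over the distinct values of A
  have hv : (PySem.Dict.counter A).values
      = (PySem.Set.ofList A).map (fun k => (List.count k A : Int)) := by
    show ((PySem.Dict.counter A).items).map (·.2) = _
    rw [PySem.Dict.items_counter]
    simp [List.map_map, Function.comp]
  rw [hv, pv_foldl_if_mod, zero_add, List.map_map]
  -- same distinct values (up to order), same counts
  have hdd : (PySem.Set.ofList A).Perm (PySem.List.dedup s) := by
    rw [List.perm_ext_iff_of_nodup (PySem.Set.nodup_ofList _) (PySem.List.nodup_dedup _)]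
    intro a
    rw [PySem.Set.mem_ofList, PySem.List.mem_dedup]
    exact ⟨fun h => hsp.mem_iff.2 h, fun h => hsp.mem_iff.1 h⟩
  have hmap := hdd.map (fun v => PySem.Int.mod (s.count v : Int) K)
  rw [← hmap.sum_eq]
  refine congrArg _ (List.map_congr_left ?_)
  intro v _
  simp [Function.comp, hsp.count_eq]

-- ===== VERDICT (by name: the statement is the Claim_ definition above) =====
theorem min_removals_to_make_frequencies_divisible_spec : Claim_equal_min_removals_to_make_frequencies_divisible := by
  intro A K _ _
  exact min_removals_spec_aux A K
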